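-- pv_equiv track=rewrite | github.com/AcceleratedIndustries/MindForge | mindforge/hygiene/conflict_detector.py | _contradicts
-- ===== SOURCE A (Python) =====
-- _QUANTIFIERS = [("always", "sometimes"), ("never", "sometimes"), ("all", "some")]
--
-- _UNITS = [("tokens", "characters"), ("bytes", "bits"), ("seconds", "minutes")]
--
-- def _contradicts(a: str, b: str) -> bool:
--     la, lb = a.lower(), b.lower()
--     for q1, q2 in _QUANTIFIERS:
--         if (q1 in la and q2 in lb) or (q2 in la and q1 in lb):
--             return True
--     for u1, u2 in _UNITS:
--         if (u1 in la and u2 in lb) or (u2 in la and u1 in lb):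
--             return True
--     return False
-- ===== SOURCE B (Python) =====
-- # Staged feature extraction: map each string to a set of (pair, side) features,
-- # then a contradiction is a nonempty intersection of a's features with b's
-- # side-flipped features.
-- _PAIRS = [("always", "sometimes"), ("never", "sometimes"), ("all", "some"),
--           ("tokens", "characters"), ("bytes", "bits"), ("seconds", "minutes")]
--
-- def _features(s):
--     ls = s.lower()
--     return {(i, side)
--             for i, pair in enumerate(_PAIRS)
--             for side, word in enumerate(pair)
--             if word in ls}
--
-- def _contradicts(a: str, b: str) -> bool:
--     flipped = {(i, 1 - side) for (i, side) in _features(b)}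
--     return bool(_features(a) & flipped)
-- ===== Notes on version B (the rewrite author's own statement) =====
-- stated objective: alternative
-- what changed: Instead of scanning two pair-lists with a symmetric two-way substring test and early return, B first extracts each string's set of (pair, side) keyword features independently, then decides contradiction as a nonempty intersection of a's feature set with b's side-flipped feature set.
import Mathlib
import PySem

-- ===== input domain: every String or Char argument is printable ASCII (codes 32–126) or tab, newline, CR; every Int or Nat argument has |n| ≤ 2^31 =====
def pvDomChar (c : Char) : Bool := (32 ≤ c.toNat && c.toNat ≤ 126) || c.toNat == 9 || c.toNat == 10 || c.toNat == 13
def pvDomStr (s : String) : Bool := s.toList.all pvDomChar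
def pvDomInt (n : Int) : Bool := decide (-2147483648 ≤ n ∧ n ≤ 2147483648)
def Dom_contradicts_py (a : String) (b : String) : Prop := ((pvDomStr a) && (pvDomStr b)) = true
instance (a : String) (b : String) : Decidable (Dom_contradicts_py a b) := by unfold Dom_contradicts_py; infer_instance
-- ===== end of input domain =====

-- B restructures A's directional pair-loops into two stages: extract each string's
-- (pair, side) feature set, then test intersection with the side-flipped features
-- (objective: alternative decomposition, same cost).

-- ===== PORT A =====
def pvQuantifiers : List (String × String) :=
  [("always", "sometimes"), ("never", "sometimes"), ("all", "some")]

def pvUnits : List (String × String) :=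
  [("tokens", "characters"), ("bytes", "bits"), ("seconds", "minutes")]

-- A's loop over a pair list with early return, checking both directions.
def pvLoopPairs : List (String × String) → String → String → Bool
  | [], _, _ => false
  | (p, q) :: rest, la, lb =>
    if (PySem.Str.isIn p la && PySem.Str.isIn q lb)
        || (PySem.Str.isIn q la && PySem.Str.isIn p lb) then true
    else pvLoopPairs rest la lb

def contradicts_py (a : String) (b : String) : Bool :=
  let la := PySem.Str.lower a
  let lb := PySem.Str.lower b
  if pvLoopPairs pvQuantifiers la lb then true
  else pvLoopPairs pvUnits la lb

-- ===== PORT B =====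
def pvPairs : List (String × String) :=
  [("always", "sometimes"), ("never", "sometimes"), ("all", "some"),
   ("tokens", "characters"), ("bytes", "bits"), ("seconds", "minutes")]

-- Source B's set comprehension over enumerate(_PAIRS) × enumerate(pair); the produced
-- (i, side) tuples are pairwise distinct, so the Python set is this list's elements.
def pvFeatures (s : String) : List (Int × Int) :=
  let ls := PySem.Str.lower s
  (PySem.List.enumerate pvPairs).flatMap (fun ip =>
    (PySem.List.enumerate [ip.2.1, ip.2.2]).flatMap (fun sw =>
      if PySem.Str.isIn sw.2 ls then [(ip.1, sw.1)] else []))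

def contradicts_py_alt (a : String) (b : String) : Bool :=
  let flipped := (pvFeatures b).map (fun f => (f.1, 1 - f.2))
  (pvFeatures a).any (fun f => flipped.contains f)

-- ===== PRECONDITION & SPEC =====
def Spec_contradicts_py (a : String) (b : String) (out : Bool) : Prop := out = contradicts_py_alt a b
instance (a : String) (b : String) (out : Bool) : Decidable (Spec_contradicts_py a b out) := by unfold Spec_contradicts_py; infer_instance

-- ===== CLAIM (what is proved, stated in full; the proofs are below) =====
def Claim_equal_contradicts_py : Prop := ∀ (a : String) (b : String), Dom_contradicts_py a b → Spec_contradicts_py a b (contradicts_py a b)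

-- ===== LEMMAS AND PROOFS =====
theorem pv_if_true_else (c b : Bool) : (if c then true else b) = (c || b) := by
  cases c <;> simp

theorem pv_any_ite_single {α : Type} (c : Bool) (v : α) (p : α → Bool) :
    (if c then [v] else []).any p = (c && p v) := by
  cases c <;> simp

theorem pv_map_ite_single {α β : Type} (c : Bool) (v : α) (g : α → β) :
    (if c then [v] else []).map g = (if c then [g v] else []) := by
  cases c <;> simp

theorem pv_contains_ite_single {α : Type} [BEq α] (c : Bool) (v x : α) :
    (if c then [v] else []).contains x = (c && (x == v)) := by
  cases c <;> simp [List.contains_cons]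

theorem pv_contains_append {α : Type} [BEq α] (l m : List α) (x : α) :
    (l ++ m).contains x = (l.contains x || m.contains x) := by
  induction l with
  | nil => simp
  | cons h t ih => simp [List.contains_cons, ih, Bool.or_assoc]

-- the feature list spelled out, one ite-singleton per (pair, side)
theorem pvFeatures_eq (s : String) : pvFeatures s =
    (let ls := PySem.Str.lower s
     (if PySem.Str.isIn "always" ls then [((0:Int),(0:Int))] else []) ++
     (if PySem.Str.isIn "sometimes" ls then [((0:Int),(1:Int))] else []) ++
     (if PySem.Str.isIn "never" ls then [((1:Int),(0:Int))] else []) ++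
     (if PySem.Str.isIn "sometimes" ls then [((1:Int),(1:Int))] else []) ++
     (if PySem.Str.isIn "all" ls then [((2:Int),(0:Int))] else []) ++
     (if PySem.Str.isIn "some" ls then [((2:Int),(1:Int))] else []) ++
     (if PySem.Str.isIn "tokens" ls then [((3:Int),(0:Int))] else []) ++
     (if PySem.Str.isIn "characters" ls then [((3:Int),(1:Int))] else []) ++
     (if PySem.Str.isIn "bytes" ls then [((4:Int),(0:Int))] else []) ++
     (if PySem.Str.isIn "bits" ls then [((4:Int),(1:Int))] else []) ++
     (if PySem.Str.isIn "seconds" ls then [((5:Int),(0:Int))] else []) ++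
     (if PySem.Str.isIn "minutes" ls then [((5:Int),(1:Int))] else [])) := by
  simp only [pvFeatures, pvPairs, PySem.List.enumerate_cons, PySem.List.enumerate_nil,
    List.flatMap_cons, List.flatMap_nil, List.append_nil, List.append_assoc]
  norm_num

-- ===== VERDICT (by name: the statement is the Claim_ definition above) =====
set_option maxRecDepth 16000 in
theorem contradicts_py_spec : Claim_equal_contradicts_py := by
  intro a b _
  unfold Spec_contradicts_py contradicts_py contradicts_py_alt
  simp only [pvFeatures_eq, List.map_append, pv_map_ite_single, pv_contains_append,
    pv_contains_ite_single, List.any_append, pv_any_ite_single,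
    pvQuantifiers, pvUnits, pvLoopPairs, pv_if_true_else,
    beq_eq_decide]
  simp
  ac_rfl
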